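-- pv_equiv track=rewrite | github.com/taufik-adinugraha/media_monitoring_poc | media_monitor/utils.py | guess_publisher_from_domain
-- ===== SOURCE A (Python) =====
-- from typing import Any, Dict, List, Optional
--
-- def guess_publisher_from_domain(domain: Optional[str]) -> str:
--     if not domain:
--         return "unknown"
--     d = domain.lower()
--     # Minimal mapping; extend as needed
--     mapping = {
--         "kompas.com": "kompas",
--         "nasional.kompas.com": "kompas",
--         "tempo.co": "tempo",
--         "nasional.tempo.co": "tempo",
--         "antaranews.com": "antara",
--         "mediaindonesia.com": "mediaindonesia",
--         "detik.com": "detik",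
--         "cnnindonesia.com": "cnnindonesia",
--         "cnbcindonesia.com": "cnbcindonesia",
--     }
--     for k, v in mapping.items():
--         if d == k or d.endswith("." + k):
--             return v
--     # fallback: domain root
--     return d.split(".")[-2] if "." in d else d
-- ===== SOURCE B (Python) =====
-- from typing import Any, Dict, List, Optional
--
-- def guess_publisher_from_domain(domain: Optional[str]) -> str:
--     if not domain:
--         return "unknown"
--     d = domain.lower()
--     mapping = {
--         "kompas.com": "kompas",
--         "nasional.kompas.com": "kompas",
--         "tempo.co": "tempo",
--         "nasional.tempo.co": "tempo",
--         "antaranews.com": "antara",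
--         "mediaindonesia.com": "mediaindonesia",
--         "detik.com": "detik",
--         "cnnindonesia.com": "cnnindonesia",
--         "cnbcindonesia.com": "cnbcindonesia",
--     }
--     # walk the domain's own dot-suffixes, longest first, looking each up in the dict
--     cand = d
--     while cand:
--         if cand in mapping:
--             return mapping[cand]
--         dot = cand.find(".")
--         if dot == -1:
--             break
--         cand = cand[dot + 1:]
--     # fallback: domain root
--     return d.split(".")[-2] if "." in d else d
-- ===== Notes on version B (the rewrite author's own statement) =====
-- stated objective: idiomatic
-- what changed: Instead of scanning all mapping entries and suffix-testing each against the domain, B walks the domain's own dot-suffixes longest-first and looks each one up in the dict, with the same guard and fallback.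
import Mathlib
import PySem

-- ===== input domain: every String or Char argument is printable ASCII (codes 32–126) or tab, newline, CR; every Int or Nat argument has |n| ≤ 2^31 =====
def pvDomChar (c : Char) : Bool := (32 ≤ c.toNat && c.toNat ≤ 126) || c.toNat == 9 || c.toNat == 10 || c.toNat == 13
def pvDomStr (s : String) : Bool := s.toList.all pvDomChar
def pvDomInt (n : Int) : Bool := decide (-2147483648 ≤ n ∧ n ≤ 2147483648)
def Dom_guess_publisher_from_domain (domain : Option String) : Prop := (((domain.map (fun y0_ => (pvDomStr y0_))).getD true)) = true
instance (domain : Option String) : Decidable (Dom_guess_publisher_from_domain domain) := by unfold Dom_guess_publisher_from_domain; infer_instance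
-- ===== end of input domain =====

-- B replaces A's scan over the mapping entries (suffix-testing each key against the domain)
-- by a walk over the domain's own dot-suffixes, longest first, looking each one up (idiomatic).

-- the literal mapping table, shared by both ports (keys as char lists)
def pvMapping : List (List Char × String) :=
  [("kompas.com".toList, "kompas"),
   ("nasional.kompas.com".toList, "kompas"),
   ("tempo.co".toList, "tempo"),
   ("nasional.tempo.co".toList, "tempo"),
   ("antaranews.com".toList, "antara"),
   ("mediaindonesia.com".toList, "mediaindonesia"),
   ("detik.com".toList, "detik"),
   ("cnnindonesia.com".toList, "cnnindonesia"),
   ("cnbcindonesia.com".toList, "cnbcindonesia")]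

-- the fallback expression `d.split(".")[-2] if "." in d else d`, identical in A and B
def pvFallback (d : List Char) : String :=
  if PySem.Chars.isIn ['.'] d then
    String.ofList (PySem.List.pyGetD (PySem.Chars.splitOn d ['.']) (-2) [])
  else String.ofList d

-- ===== PORT A =====
-- `for k, v in mapping.items(): if d == k or d.endswith("." + k): return v`
def pvALoop (m : List (List Char × String)) (d : List Char) : Option String :=
  match m with
  | [] => none
  | (k, v) :: rest =>
    if d == k || PySem.Chars.endswith d ('.' :: k) then some v else pvALoop rest d

def guess_publisher_from_domain (domain : Option String) : String :=
  match domain with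
  | none => "unknown"
  | some s =>
    if s.toList = [] then "unknown"
    else
      let d := PySem.Chars.lower s.toList
      match pvALoop pvMapping d with
      | some v => v
      | none => pvFallback d

-- ===== PORT B =====
-- `while cand: if cand in mapping: return mapping[cand]; dot = cand.find("."); if dot == -1: break; cand = cand[dot+1:]`
def pvBLoop (cand : List Char) : Option String :=
  if _h : cand = [] then none
  else
    match PySem.Dict.get? ⟨pvMapping⟩ cand with
    | some v => some v
    | none =>
      let dot := PySem.Chars.find cand ['.']
      if _hd : 0 ≤ dot then pvBLoop (cand.drop (dot.toNat + 1)) else none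
termination_by cand.length
decreasing_by
  simp only [List.length_drop]
  have : cand.length ≠ 0 := fun h0 => _h (List.eq_nil_of_length_eq_zero h0)
  omega

def guess_publisher_from_domain_alt (domain : Option String) : String :=
  match domain with
  | none => "unknown"
  | some s =>
    if s.toList = [] then "unknown"
    else
      let d := PySem.Chars.lower s.toList
      match pvBLoop d with
      | some v => v
      | none => pvFallback d

-- ===== PRECONDITION & SPEC =====
def Spec_guess_publisher_from_domain (domain : Option String) (out : String) : Prop := out = guess_publisher_from_domain_alt domain
instance (domain : Option String) (out : String) : Decidable (Spec_guess_publisher_from_domain domain out) := by unfold Spec_guess_publisher_from_domain; infer_instance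

-- ===== CLAIM (what is proved, stated in full; the proofs are below) =====
def Claim_equal_guess_publisher_from_domain : Prop := ∀ (domain : Option String), Dom_guess_publisher_from_domain domain → Spec_guess_publisher_from_domain domain (guess_publisher_from_domain domain)

-- ===== LEMMAS AND PROOFS =====

-- `pvMatch d k`: A's per-key condition (d == k or d.endswith("." + k))
def pvMatch (d k : List Char) : Prop := d = k ∨ ('.' :: k) <:+ d

theorem pvALoop_eq_none_iff (m : List (List Char × String)) (d : List Char) :
    pvALoop m d = none ↔ ∀ p ∈ m, ¬ pvMatch d p.1 := by
  induction m with
  | nil => simp [pvALoop]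
  | cons p rest ih =>
    obtain ⟨k, v⟩ := p
    simp only [pvALoop]
    by_cases h : pvMatch d k
    · have hb : (d == k || PySem.Chars.endswith d ('.' :: k)) = true := by
        rcases h with h | h
        · simp [h]
        · simp [PySem.Chars.endswith_iff, h]
      simp only [hb, if_true]
      constructor
      · intro hnone; cases hnone
      · intro hall; exact absurd h (hall (k, v) (by simp))
    · have hb : (d == k || PySem.Chars.endswith d ('.' :: k)) = false := by
        rw [Bool.eq_false_iff]
        intro hc
        simp only [Bool.or_eq_true, beq_iff_eq, PySem.Chars.endswith_iff] at hc
        exact h hc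
      simp only [hb, Bool.false_eq_true, if_false, ih]
      constructor
      · intro hall p hp
        rcases List.mem_cons.mp hp with rfl | hp
        · exact h
        · exact hall p hp
      · intro hall p hp
        exact hall p (List.mem_cons_of_mem _ hp)

theorem pvALoop_eq_some (m : List (List Char × String)) (d : List Char) (v : String)
    (h : pvALoop m d = some v) : ∃ p ∈ m, p.2 = v ∧ pvMatch d p.1 := by
  induction m with
  | nil => simp [pvALoop] at h
  | cons p rest ih =>
    obtain ⟨k, w⟩ := p
    simp only [pvALoop] at h
    by_cases hc : (d == k || PySem.Chars.endswith d ('.' :: k)) = true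
    · rw [if_pos hc] at h
      refine ⟨(k, w), by simp, by simpa using h, ?_⟩
      simp only [Bool.or_eq_true, beq_iff_eq, PySem.Chars.endswith_iff] at hc
      exact hc
    · rw [if_neg hc] at h
      obtain ⟨p, hp, hv, hm⟩ := ih h
      exact ⟨p, List.mem_cons_of_mem _ hp, hv, hm⟩

-- every mapping key is nonempty
theorem pvKeys_ne_nil : ∀ p ∈ pvMapping, p.1 ≠ [] := by decide

-- any two mapping keys that can both match one domain carry the same value
theorem pvAgree : ∀ p ∈ pvMapping, ∀ q ∈ pvMapping,
    (p.1 = q.1 ∨ ('.' :: p.1) <:+ q.1 ∨ ('.' :: q.1) <:+ p.1) → p.2 = q.2 := by decide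

theorem pvMem_iff_infix (d : List Char) : '.' ∈ d ↔ ['.'] <:+: d := by
  constructor
  · intro h
    obtain ⟨pre, suf, rfl⟩ := List.append_of_mem h
    exact ⟨pre, suf, by simp⟩
  · intro h
    exact h.subset (by simp)

-- a suffix `'.' :: k` forces a dot in the string
theorem pvNoDot {d k : List Char} (hnd : '.' ∉ d) : ¬ ('.' :: k) <:+ d := by
  intro h
  exact hnd (h.subset (by simp))

-- first-dot decomposition from `cand.find(".")`
theorem pvFirstDot (d : List Char) (h : 0 ≤ PySem.Chars.find d ['.']) :
    ∃ pre, d = pre ++ '.' :: d.drop ((PySem.Chars.find d ['.']).toNat + 1) ∧ '.' ∉ pre := by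
  obtain ⟨hpre, hmin⟩ := PySem.Chars.find_spec h
  set j := (PySem.Chars.find d ['.']).toNat with hj
  obtain ⟨rest, hrest⟩ := hpre
  have hdropj : d.drop j = '.' :: d.drop (j + 1) := by
    rw [← hrest]
    congr 1
    have : d.drop (j + 1) = (d.drop j).drop 1 := by
      rw [List.drop_drop]
    rw [this, ← hrest]
    simp
  refine ⟨d.take j, ?_, ?_⟩
  · rw [← hdropj, List.take_append_drop]
  · intro hmem
    obtain ⟨i, hi, hget⟩ := List.mem_iff_getElem.mp hmem
    have hi' : i < j ∧ i < d.length := by simpa using hi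
    have hij : i < j := hi'.1
    have hid : i < d.length := hi'.2
    refine hmin i hij ?_
    have : d.drop i = d[i] :: d.drop (i + 1) := List.drop_eq_getElem_cons hid
    rw [this]
    have : d[i] = '.' := by
      rw [← hget]; simp [List.getElem_take]
    rw [this]
    exact ⟨d.drop (i + 1), rfl⟩

-- with the first dot split off, `'.'::k` is a suffix of d iff k is the tail or sits deeper
theorem pvMatch_shift {d pre t k : List Char} (hd : d = pre ++ '.' :: t) (hpre : '.' ∉ pre) :
    ('.' :: k) <:+ d ↔ k = t ∨ ('.' :: k) <:+ t := by
  subst hd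
  constructor
  · rintro ⟨q, hq⟩
    -- hq : q ++ '.' :: k = pre ++ '.' :: t
    have hqp : q <+: pre ++ '.' :: t := ⟨'.' :: k, hq⟩
    have hpp : pre <+: pre ++ '.' :: t := ⟨'.' :: t, rfl⟩
    rcases List.prefix_or_prefix_of_prefix hqp hpp with hql | hpl
    · obtain ⟨r, hr⟩ := hql
      rw [← hr, List.append_assoc] at hq
      have hk := List.append_cancel_left hq
      cases r with
      | nil => exact Or.inl (by simpa using hk)
      | cons c r' =>
        exfalso
        have hc : c = '.' := by
          have := hk; simp at this; exact this.1.symm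
        apply hpre
        rw [← hr, hc]
        simp
    · obtain ⟨r, hr⟩ := hpl
      rw [← hr, List.append_assoc] at hq
      have hk := (List.append_cancel_left hq).symm
      -- hk : r ++ '.' :: k = '.' :: t
      cases r with
      | nil => exact Or.inl (by simpa using hk.symm)
      | cons c r' =>
        have hc : r' ++ '.' :: k = t := by
          have := hk; simp at this; exact this.2.symm
        exact Or.inr ⟨r', hc⟩
  · rintro (rfl | ⟨q, hq⟩)
    · exact ⟨pre, rfl⟩
    · exact ⟨pre ++ '.' :: q, by simp [← hq]⟩

-- two keys matching the same domain are dot-suffix comparable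
theorem pvComparable {d k1 k2 : List Char} (h1 : pvMatch d k1) (h2 : pvMatch d k2) :
    k1 = k2 ∨ ('.' :: k1) <:+ k2 ∨ ('.' :: k2) <:+ k1 := by
  have step : ∀ {a b : List Char}, ('.' :: a) <:+ ('.' :: b) → a = b ∨ ('.' :: a) <:+ b := by
    intro a b h
    rcases List.suffix_cons_iff.mp h with h | h
    · exact Or.inl (by simpa using h)
    · exact Or.inr h
  rcases h1 with rfl | h1
  · rcases h2 with rfl | h2
    · exact Or.inl rfl
    · exact Or.inr (Or.inr h2)
  · rcases h2 with rfl | h2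
    · exact Or.inr (Or.inl h1)
    · rcases List.suffix_or_suffix_of_suffix h1 h2 with h | h
      · rcases step h with h | h
        · exact Or.inl h
        · exact Or.inr (Or.inl h)
      · rcases step h with h | h
        · exact Or.inl h.symm
        · exact Or.inr (Or.inr h)

-- `cand in mapping` hit gives a matching key
theorem pvDictHit {d : List Char} {v : String}
    (h : PySem.Dict.get? (⟨pvMapping⟩ : PySem.Dict (List Char) String) d = some v) :
    (d, v) ∈ pvMapping :=
  PySem.Dict.mem_items_of_get?_eq_some _ h

theorem pvDictMiss {d : List Char}
    (h : PySem.Dict.get? (⟨pvMapping⟩ : PySem.Dict (List Char) String) d = none) :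
    ∀ p ∈ pvMapping, d ≠ p.1 := by
  intro p hp he
  have hk := (PySem.Dict.get?_eq_none_iff_not_mem_keys (⟨pvMapping⟩ : PySem.Dict (List Char) String) d).mp h
  exact hk (by simp only [PySem.Dict.keys, List.mem_map]; exact ⟨p, hp, he.symm⟩)

theorem pvBLoop_eq_none_iff (d : List Char) :
    pvBLoop d = none ↔ ∀ p ∈ pvMapping, ¬ pvMatch d p.1 := by
  induction d using pvBLoop.induct with
  | case1 =>
    rw [pvBLoop]
    rw [dif_pos rfl]
    simp only [true_iff]
    intro p hp hm
    rcases hm with hm | hm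
    · exact pvKeys_ne_nil p hp hm.symm
    · simp at hm
  | case2 cand hne v hget =>
    rw [pvBLoop]
    rw [dif_neg hne]
    simp only [hget]
    constructor
    · intro h; cases h
    · intro hall
      exact absurd (Or.inl rfl : pvMatch cand cand)
        (by
          have := pvDictHit hget
          exact hall (cand, v) this)
  | case3 cand hne hget dot hd ih =>
    rw [pvBLoop]
    rw [dif_neg hne]
    simp only [hget]
    rw [dif_pos hd]
    rw [ih]
    obtain ⟨pre, hdd, hpre⟩ := pvFirstDot cand hd
    have hne' := pvDictMiss hget
    constructor
    · intro hall p hp hm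
      rcases hm with hm | hm
      · exact hne' p hp hm
      · rcases (pvMatch_shift hdd hpre).mp hm with he | hs
        · exact hall p hp (Or.inl he.symm)
        · exact hall p hp (Or.inr hs)
    · intro hall p hp hm
      refine hall p hp ?_
      rcases hm with hm | hm
      · exact Or.inr ((pvMatch_shift hdd hpre).mpr (Or.inl hm.symm))
      · exact Or.inr ((pvMatch_shift hdd hpre).mpr (Or.inr hm))
  | case4 cand hne hget dot hd =>
    rw [pvBLoop]
    rw [dif_neg hne]
    simp only [hget]
    rw [dif_neg hd]
    have hdm1 : PySem.Chars.find cand ['.'] = -1 := by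
      have h1 := PySem.Chars.neg_one_le_find cand ['.']
      have h2 : ¬ 0 ≤ PySem.Chars.find cand ['.'] := hd
      omega
    have hnd : '.' ∉ cand := by
      intro hmem
      exact absurd hdm1 ((PySem.Chars.find_ne_neg_one_iff _ _).mpr ((pvMem_iff_infix cand).mp hmem))
    constructor
    · intro _ p hp hm
      rcases hm with hm | hm
      · exact pvDictMiss hget p hp hm
      · exact pvNoDot hnd hm
    · intro _; rfl

theorem pvBLoop_eq_some (d : List Char) (v : String) (h : pvBLoop d = some v) :
    ∃ p ∈ pvMapping, p.2 = v ∧ pvMatch d p.1 := by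
  induction d using pvBLoop.induct with
  | case1 => rw [pvBLoop] at h; simp at h
  | case2 cand hne w hget =>
    rw [pvBLoop] at h
    rw [dif_neg hne] at h
    simp only [hget] at h
    exact ⟨(cand, w), pvDictHit hget, by simpa using h, Or.inl rfl⟩
  | case3 cand hne hget dot hd ih =>
    rw [pvBLoop] at h
    rw [dif_neg hne] at h
    simp only [hget] at h
    rw [dif_pos hd] at h
    obtain ⟨p, hp, hv, hm⟩ := ih h
    obtain ⟨pre, hdd, hpre⟩ := pvFirstDot cand hd
    refine ⟨p, hp, hv, ?_⟩
    rcases hm with he | hm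
    · exact Or.inr ((pvMatch_shift hdd hpre).mpr (Or.inl he.symm))
    · exact Or.inr ((pvMatch_shift hdd hpre).mpr (Or.inr hm))
  | case4 cand hne hget dot hd =>
    rw [pvBLoop] at h
    rw [dif_neg hne] at h
    simp only [hget] at h
    rw [dif_neg hd] at h
    cases h

theorem pvLoops_eq (d : List Char) : pvBLoop d = pvALoop pvMapping d := by
  cases hA : pvALoop pvMapping d with
  | none =>
    rw [(pvBLoop_eq_none_iff d).mpr ((pvALoop_eq_none_iff pvMapping d).mp hA)]
  | some v =>
    cases hB : pvBLoop d with
    | none =>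
      obtain ⟨p, hp, _, hm⟩ := pvALoop_eq_some pvMapping d v hA
      exact absurd hm ((pvBLoop_eq_none_iff d).mp hB p hp)
    | some w =>
      obtain ⟨p, hp, hpv, hpm⟩ := pvALoop_eq_some pvMapping d v hA
      obtain ⟨q, hq, hqv, hqm⟩ := pvBLoop_eq_some d w hB
      have := pvAgree q hq p hp (pvComparable hqm hpm)
      rw [hqv, hpv] at this
      rw [this]

-- ===== VERDICT (by name: the statement is the Claim_ definition above) =====
theorem guess_publisher_from_domain_spec : Claim_equal_guess_publisher_from_domain := by
  intro domain _
  unfold Spec_guess_publisher_from_domain guess_publisher_from_domain guess_publisher_from_domain_alt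
  cases domain with
  | none => rfl
  | some s =>
    by_cases h : s.toList = []
    · simp [h]
    · simp only [if_neg h]
      rw [pvLoops_eq]
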